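-- pv_equiv track=rewrite | github.com/Astroow/INFOPSIET | IPT/DM/centrale_2022.py | est_ferme1
-- ===== SOURCE A (Python) =====
-- def est_ferme1(c: [str]) -> bool:
--     o = 0
--     for e in c:
--         if e == "G":
--             o = (o - 1) % 4
--         elif e == "D":
--             o = (o + 1) % 4
--     if o == 0:
--         return True
--     return False
-- ===== SOURCE B (Python) =====
-- def est_ferme1(c: [str]) -> bool:
--     return (c.count("D") - c.count("G")) % 4 == 0
-- ===== Notes on version B (the rewrite author's own statement) =====
-- stated objective: simpler
-- what changed: Replaces the per-element running orientation state and branches by two aggregate counts and one closed-form modular test (D-count minus G-count divisible by 4).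
import Mathlib
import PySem

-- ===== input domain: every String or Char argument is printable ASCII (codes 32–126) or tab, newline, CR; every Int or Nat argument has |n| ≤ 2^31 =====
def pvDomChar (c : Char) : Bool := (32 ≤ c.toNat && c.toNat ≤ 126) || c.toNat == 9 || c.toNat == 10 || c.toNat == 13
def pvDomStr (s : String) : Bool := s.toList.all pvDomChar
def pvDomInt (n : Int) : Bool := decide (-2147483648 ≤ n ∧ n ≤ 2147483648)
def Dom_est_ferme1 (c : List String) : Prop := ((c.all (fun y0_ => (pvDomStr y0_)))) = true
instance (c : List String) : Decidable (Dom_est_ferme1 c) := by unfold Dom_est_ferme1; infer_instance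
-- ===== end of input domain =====

-- B replaces A's per-element running orientation state by two aggregate counts and one closed-form modular test (simpler).


-- ===== PORT A =====
def est_ferme1 (c : List String) : Bool :=
  let o : Int := c.foldl (fun o e =>
    if e == "G" then PySem.Int.mod (o - 1) 4
    else if e == "D" then PySem.Int.mod (o + 1) 4
    else o) 0
  if o == 0 then true else false

-- ===== PORT B =====
def est_ferme1_alt (c : List String) : Bool :=
  PySem.Int.mod ((PySem.List.count c "D" : Int) - (PySem.List.count c "G" : Int)) 4 == 0

-- ===== PRECONDITION & SPEC =====
def Spec_est_ferme1 (c : List String) (out : Bool) : Prop := out = est_ferme1_alt c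
instance (c : List String) (out : Bool) : Decidable (Spec_est_ferme1 c out) := by unfold Spec_est_ferme1; infer_instance

-- ===== CLAIM (what is proved, stated in full; the proofs are below) =====
def Claim_equal_est_ferme1 : Prop := ∀ (c : List String), Dom_est_ferme1 c → Spec_est_ferme1 c (est_ferme1 c)

-- ===== LEMMAS AND PROOFS =====

-- Invariant of A's loop: from a state 0 ≤ o < 4 it ends at (o + #D - #G) % 4.
theorem est_ferme1_loop_inv (c : List String) :
    ∀ (o : Int), 0 ≤ o → o < 4 →
      c.foldl (fun o e =>
        if e == "G" then PySem.Int.mod (o - 1) 4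
        else if e == "D" then PySem.Int.mod (o + 1) 4
        else o) o
      = (o + (List.count "D" c : Int) - (List.count "G" c : Int)) % 4 := by
  induction c with
  | nil =>
      intro o h0 h4
      simp [Int.emod_eq_of_lt h0 h4]
  | cons e t ih =>
      intro o h0 h4
      by_cases hG : e = "G"
      · have hne : e ≠ "D" := by simp [hG]
        simp only [List.foldl, hG, beq_self_eq_true, if_pos]
        rw [PySem.Int.mod_eq_emod_of_pos (by norm_num)]
        rw [ih ((o - 1) % 4) (Int.emod_nonneg _ (by norm_num)) (Int.emod_lt_of_pos _ (by norm_num))]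
        simp
        omega
      · by_cases hD : e = "D"
        · simp only [List.foldl, hD, beq_self_eq_true]
          have : ("D" == "G") = false := by decide
          simp only [this, Bool.false_eq_true, if_false, if_pos]
          rw [PySem.Int.mod_eq_emod_of_pos (by norm_num)]
          rw [ih ((o + 1) % 4) (Int.emod_nonneg _ (by norm_num)) (Int.emod_lt_of_pos _ (by norm_num))]
          simp
          omega
        · have h1 : (e == "G") = false := by simp [hG]
          have h2 : (e == "D") = false := by simp [hD]
          simp only [List.foldl, h1, h2, Bool.false_eq_true, if_false]
          rw [ih o h0 h4]
          simp [hG, hD]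


-- ===== VERDICT (by name: the statement is the Claim_ definition above) =====
theorem est_ferme1_spec : Claim_equal_est_ferme1 := by
  intro c _
  unfold Spec_est_ferme1 est_ferme1 est_ferme1_alt
  rw [est_ferme1_loop_inv c 0 (by norm_num) (by norm_num)]
  rw [PySem.Int.mod_eq_emod_of_pos (by norm_num)]
  simp only [PySem.List.count_eq, zero_add]
  by_cases h : ((List.count "D" c : Int) - (List.count "G" c : Int)) % 4 = 0 <;> simp [h]
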